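-- pv_equiv track=rewrite | github.com/Bemnet-13/LeetCode_Solutions | LeetCode#2391.py | garbageTypeCollector
-- ===== SOURCE A (Python) =====
-- def garbageTypeCollector(garbage, time, type):
--     garbageCount = 0
--     stopper = 0
--     for i in range(len(garbage)):
--         if type in garbage[i]:
--             stopper = i
--             garbageCount += garbage[i].count(type)
--
--     return garbageCount + time[stopper]
-- ===== SOURCE B (Python) =====
-- def garbageTypeCollector(garbage, time, type):
--     total = sum(s.count(type) for s in garbage)
--     last = next((i for i in reversed(range(len(garbage))) if type in garbage[i]), 0)
--     return total + time[last]
-- ===== Notes on version B (the rewrite author's own statement) =====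
-- stated objective: simpler
-- what changed: Replaces A's single forward loop carrying a (count, stopper) state pair with two independent passes: an unconditional sum of per-string counts plus a reverse scan with early exit that finds the last string containing the type (defaulting to index 0).
import Mathlib
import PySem

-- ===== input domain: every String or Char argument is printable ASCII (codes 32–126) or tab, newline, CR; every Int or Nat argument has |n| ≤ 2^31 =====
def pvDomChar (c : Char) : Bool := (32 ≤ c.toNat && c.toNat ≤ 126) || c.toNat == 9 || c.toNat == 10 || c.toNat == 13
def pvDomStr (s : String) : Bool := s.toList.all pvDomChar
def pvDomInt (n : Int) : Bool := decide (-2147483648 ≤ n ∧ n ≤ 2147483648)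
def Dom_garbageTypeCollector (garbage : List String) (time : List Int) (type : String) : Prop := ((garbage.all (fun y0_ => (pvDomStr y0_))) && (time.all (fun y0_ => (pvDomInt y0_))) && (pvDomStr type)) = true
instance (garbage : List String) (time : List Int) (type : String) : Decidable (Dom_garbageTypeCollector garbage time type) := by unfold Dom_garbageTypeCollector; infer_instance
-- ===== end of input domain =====

-- B replaces A's single forward loop carrying a (count, stopper) pair with two independent
-- passes: an unconditional sum of per-string counts, plus a reverse scan with early exit
-- finding the last string containing `type` (default index 0). Objective: simpler.

-- ===== PORT A =====
-- one forward loop over i in range(len(garbage)) carrying (garbageCount, stopper)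
def garbageTypeCollector (garbage : List String) (time : List Int) (type : String) : Int :=
  let st :=
    (PySem.List.pyRange 0 (garbage.length : Int)).foldl
      (fun (st : Int × Int) i =>
        if PySem.Str.isIn type (PySem.List.pyGetD garbage i "") then
          (st.1 + (PySem.Str.count (PySem.List.pyGetD garbage i "") type : Int), i)
        else st)
      (0, 0)
  st.1 + PySem.List.pyGetD time st.2 0

-- ===== PORT B =====
-- total = sum(s.count(type) for s in garbage); last = reverse scan with early exit, default 0
def garbageTypeCollector_alt (garbage : List String) (time : List Int) (type : String) : Int :=
  let total : Int := (garbage.map (fun s => (PySem.Str.count s type : Int))).sum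
  let last : Nat :=
    (((List.range garbage.length).reverse).find?
      (fun i => PySem.Str.isIn type (garbage.getD i ""))).getD 0
  total + PySem.List.pyGetD time (last : Int) 0

-- ===== PRECONDITION & SPEC =====
-- A evaluates time[stopper]; it raises IndexError iff time is empty (stopper defaults to 0)
-- or the last index whose string contains `type` is ≥ len(time). Pre_ is exactly where A returns.
def Pre_garbageTypeCollector (garbage : List String) (time : List Int) (type : String) : Prop :=
  0 < time.length ∧
  ∀ i, i < garbage.length → PySem.Str.isIn type (garbage.getD i "") = true → i < time.length
instance (garbage : List String) (time : List Int) (type : String) : Decidable (Pre_garbageTypeCollector garbage time type) := by unfold Pre_garbageTypeCollector; infer_instance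

def pvWitness_garbageTypeCollector : List String × List Int × String := (["a ba", "c"], [5, 7], "a")

def Spec_garbageTypeCollector (garbage : List String) (time : List Int) (type : String) (out : Int) : Prop := out = garbageTypeCollector_alt garbage time type
instance (garbage : List String) (time : List Int) (type : String) (out : Int) : Decidable (Spec_garbageTypeCollector garbage time type out) := by unfold Spec_garbageTypeCollector; infer_instance

-- ===== CLAIM (what is proved, stated in full; the proofs are below) =====
def Claim_equal_garbageTypeCollector : Prop := ∀ (garbage : List String) (time : List Int) (type : String), Dom_garbageTypeCollector garbage time type → Pre_garbageTypeCollector garbage time type → Spec_garbageTypeCollector garbage time type (garbageTypeCollector garbage time type)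

-- ===== LEMMAS AND PROOFS =====

-- count.go never increments when sub occurs nowhere in s
theorem pvCountGo_of_not_infix (sub : List Char) :
    ∀ (fuel : Nat) (s : List Char) (acc : Nat), ¬ sub <:+: s →
      PySem.Chars.count.go sub fuel s acc = acc := by
  intro fuel
  induction fuel with
  | zero => intro s acc _; cases s <;> simp [PySem.Chars.count.go]
  | succ n ih =>
    intro s acc h
    cases s with
    | nil => simp [PySem.Chars.count.go]
    | cons hd tl =>
      have hp : sub.isPrefixOf (hd :: tl) = false := by
        cases hq : sub.isPrefixOf (hd :: tl)
        · rfl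
        · exact absurd ((List.isPrefixOf_iff_prefix.mp hq).isInfix) h
      rw [PySem.Chars.count.go]
      simp only [hp, Bool.false_eq_true, if_false]
      exact ih tl acc (fun hinf => h (hinf.trans (List.suffix_cons hd tl).isInfix))

theorem pvCount_eq_zero_of_isIn_false (s sub : String)
    (h : PySem.Str.isIn sub s = false) : PySem.Str.count s sub = 0 := by
  have hinf : ¬ sub.toList <:+: s.toList := by
    have := PySem.Chars.isIn_eq_false_iff sub.toList s.toList
    simp only [PySem.Str.isIn_eq] at h
    exact this.mp h
  have hne : sub.toList ≠ [] := by
    intro hnil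
    exact hinf (hnil ▸ List.nil_infix)
  simp only [PySem.Str.count_eq, PySem.Chars.count]
  rw [if_neg (by simp [hne])]
  exact pvCountGo_of_not_infix sub.toList s.toList.length s.toList 0 hinf

-- the loop invariant: after the first n indices, A's state is (sum of counts over the
-- first n strings, last index < n whose string contains type, cast to Int, default 0)
theorem pvFold_inv (garbage : List String) (type : String) :
    ∀ (n : Nat), n ≤ garbage.length →
      ((List.range n).map (fun k : Nat => (k : Int))).foldl
        (fun (st : Int × Int) i =>
          if PySem.Str.isIn type (PySem.List.pyGetD garbage i "") then
            (st.1 + (PySem.Str.count (PySem.List.pyGetD garbage i "") type : Int), i)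
          else st)
        (0, 0)
      = ( ((garbage.take n).map (fun s => (PySem.Str.count s type : Int))).sum,
          (((((List.range n).reverse).find?
              (fun i => PySem.Str.isIn type (garbage.getD i ""))).getD 0 : Nat) : Int) ) := by
  intro n
  induction n with
  | zero => intro _; simp
  | succ m ih =>
    intro hm
    have hm' : m < garbage.length := hm
    rw [List.range_succ, List.map_append, List.foldl_append, ih (Nat.le_of_lt hm')]
    have hget : PySem.List.pyGetD garbage (m : Int) "" = garbage.getD m "" := by
      simp [PySem.List.pyGetD_natCast]
    have htake : garbage.take (m + 1) = garbage.take m ++ [garbage.getD m ""] := by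
      rw [List.take_add_one]
      congr 1
      rw [List.getElem?_eq_getElem hm']
      simp [List.getD, List.getElem?_eq_getElem hm']
    have hrev' : (List.range m ++ [m]).reverse = m :: (List.range m).reverse := by
      rw [List.reverse_append]; rfl
    cases hin : PySem.Str.isIn type (garbage.getD m "") with
    | true =>
      simp only [List.map_cons, List.map_nil, List.foldl_cons, List.foldl_nil, hget, hin,
        if_true, htake, List.map_append, List.sum_append, List.sum_cons, List.sum_nil,
        add_zero, hrev']
      have hfind : List.find? (fun i => PySem.Str.isIn type (garbage.getD i ""))
          (m :: (List.range m).reverse) = some m := List.find?_cons_of_pos hin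
      rw [hfind, Option.getD_some]
    | false =>
      have hzero : PySem.Str.count (garbage.getD m "") type = 0 :=
        pvCount_eq_zero_of_isIn_false _ _ hin
      have hfalse : ¬ (PySem.Str.isIn type (garbage.getD m "") = true) := by
        simp only [hin]; exact Bool.false_ne_true
      simp only [List.map_cons, List.map_nil, List.foldl_cons, List.foldl_nil, hget, hin,
        Bool.false_eq_true, if_false, htake, List.map_append, List.sum_append,
        List.sum_cons, List.sum_nil, hzero, Nat.cast_zero, add_zero, hrev']
      have hfind : List.find? (fun i => PySem.Str.isIn type (garbage.getD i ""))
          (m :: (List.range m).reverse)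
          = List.find? (fun i => PySem.Str.isIn type (garbage.getD i "")) (List.range m).reverse :=
        List.find?_cons_of_neg hfalse
      rw [hfind]

-- ===== VERDICT (by name: the statement is the Claim_ definition above) =====
theorem garbageTypeCollector_spec : Claim_equal_garbageTypeCollector := by
  intro garbage time type _ _
  unfold Spec_garbageTypeCollector garbageTypeCollector garbageTypeCollector_alt
  rw [PySem.List.pyRange_zero_natCast, pvFold_inv garbage type garbage.length (le_refl _)]
  simp [List.take_length]
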